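-- pv_equiv track=rewrite | github.com/kaiyote/aoc2023 | aoc2023/day3.py | __is_adjacent_to_part
-- ===== SOURCE A (Python) =====
-- import itertools
--
-- def __is_adjacent_to_part(num_pos: list[tuple[int, int]], part_pos: list[tuple[int, int]]) -> int:
--   adj_part_count = 0
--
--   for (x, y) in part_pos:
--     adj_pos = [(x + x1, y + y1) for (x1, y1) in list(set(itertools.combinations([1,0,-1,1,-1,0], 2)))]
--     adj_num_pos = [x for x in num_pos if x in adj_pos]
--     if len(adj_num_pos) > 0:
--       adj_part_count += 1
--
--   return adj_part_count
-- ===== SOURCE B (Python) =====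
-- def __is_adjacent_to_part(num_pos: list[tuple[int, int]], part_pos: list[tuple[int, int]]) -> int:
--   near = set()
--   for (nx, ny) in num_pos:
--     for dx in (-1, 0, 1):
--       for dy in (-1, 0, 1):
--         near.add((nx + dx, ny + dy))
--
--   count = 0
--   for p in part_pos:
--     if p in near:
--       count += 1
--   return count
-- ===== Notes on version B (the rewrite author's own statement) =====
-- stated objective: faster
-- what changed: B precomputes once the set of all cells within the 3x3 block of any number position and then counts parts by a single set-membership pass, instead of A's per-part rebuild of the 9-offset list and linear rescan of num_pos for every part.
import Mathlib
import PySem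

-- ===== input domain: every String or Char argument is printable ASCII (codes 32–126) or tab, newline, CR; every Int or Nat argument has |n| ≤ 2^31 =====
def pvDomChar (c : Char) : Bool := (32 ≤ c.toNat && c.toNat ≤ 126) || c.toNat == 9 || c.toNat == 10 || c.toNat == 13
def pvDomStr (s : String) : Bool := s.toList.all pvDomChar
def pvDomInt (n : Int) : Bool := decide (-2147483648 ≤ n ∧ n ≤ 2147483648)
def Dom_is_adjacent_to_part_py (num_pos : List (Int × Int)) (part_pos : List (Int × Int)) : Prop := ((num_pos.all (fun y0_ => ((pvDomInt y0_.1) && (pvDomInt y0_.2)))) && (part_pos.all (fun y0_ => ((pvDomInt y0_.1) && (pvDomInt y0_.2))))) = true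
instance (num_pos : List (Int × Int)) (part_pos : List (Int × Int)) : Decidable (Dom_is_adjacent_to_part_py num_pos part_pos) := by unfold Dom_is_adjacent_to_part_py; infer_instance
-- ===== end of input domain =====

-- B precomputes the set of all cells in the 3x3 block of any number once, then counts parts by membership (one pass each), instead of A's per-part offset-list rebuild and rescan of num_pos: faster.

-- ===== PORT A =====
-- itertools.combinations(xs, 2): all pairs (xs[i], xs[j]) with i < j
def pvCombos2 : List Int → List (Int × Int)
  | [] => []
  | x :: rest => rest.map (fun y => (x, y)) ++ pvCombos2 rest

def is_adjacent_to_part_py (num_pos : List (Int × Int)) (part_pos : List (Int × Int)) : Int :=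
  part_pos.foldl (fun adj_part_count p =>
    let adj_pos := (PySem.Set.ofList (pvCombos2 [1, 0, -1, 1, -1, 0])).map
      (fun d => (p.1 + d.1, p.2 + d.2))
    let adj_num_pos := num_pos.filter (fun x => adj_pos.contains x)
    if adj_num_pos.length > 0 then adj_part_count + 1 else adj_part_count) 0

-- ===== PORT B =====
def is_adjacent_to_part_py_alt (num_pos : List (Int × Int)) (part_pos : List (Int × Int)) : Int :=
  let near : PySem.Set (Int × Int) :=
    num_pos.foldl (fun s n =>
      ([-1, 0, 1] : List Int).foldl (fun s dx =>
        ([-1, 0, 1] : List Int).foldl (fun s dy =>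
          PySem.Set.add s (n.1 + dx, n.2 + dy)) s) s) PySem.Set.empty
  part_pos.foldl (fun count p =>
    if PySem.Set.contains near p then count + 1 else count) 0

-- ===== PRECONDITION & SPEC =====
def Spec_is_adjacent_to_part_py (num_pos : List (Int × Int)) (part_pos : List (Int × Int)) (out : Int) : Prop := out = is_adjacent_to_part_py_alt num_pos part_pos
instance (num_pos : List (Int × Int)) (part_pos : List (Int × Int)) (out : Int) : Decidable (Spec_is_adjacent_to_part_py num_pos part_pos out) := by unfold Spec_is_adjacent_to_part_py; infer_instance

-- ===== CLAIM (what is proved, stated in full; the proofs are below) =====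
def Claim_equal_is_adjacent_to_part_py : Prop := ∀ (num_pos : List (Int × Int)) (part_pos : List (Int × Int)), Dom_is_adjacent_to_part_py num_pos part_pos → Spec_is_adjacent_to_part_py num_pos part_pos (is_adjacent_to_part_py num_pos part_pos)

-- ===== LEMMAS AND PROOFS =====

-- the deduplicated offset list A builds, as a literal
theorem pvOffsA_eval : PySem.Set.ofList (pvCombos2 [1, 0, -1, 1, -1, 0]) =
    [(1,0),(1,-1),(1,1),(0,-1),(0,1),(0,0),(-1,1),(-1,-1),(-1,0)] := by decide

theorem pvMem_offsA (a b : Int) :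
    ((a, b) ∈ PySem.Set.ofList (pvCombos2 [1, 0, -1, 1, -1, 0])) ↔
      ((a = -1 ∨ a = 0 ∨ a = 1) ∧ (b = -1 ∨ b = 0 ∨ b = 1)) := by
  rw [pvOffsA_eval]; simp [List.mem_cons, Prod.mk.injEq]; omega

-- the inner 3x3 double fold of B adds exactly the 3x3 block of n
theorem pvMem_inner (n : Int × Int) (s : PySem.Set (Int × Int)) (q : Int × Int) :
    q ∈ (([-1, 0, 1] : List Int).foldl (fun s dx =>
        ([-1, 0, 1] : List Int).foldl (fun s dy =>
          PySem.Set.add s (n.1 + dx, n.2 + dy)) s) s) ↔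
      q ∈ s ∨ ∃ dx, (dx = -1 ∨ dx = 0 ∨ dx = 1) ∧
        ∃ dy, (dy = -1 ∨ dy = 0 ∨ dy = 1) ∧ q = (n.1 + dx, n.2 + dy) := by
  simp only [List.foldl, PySem.Set.mem_add]
  constructor
  · rintro (((((((((h | h) | h) | h) | h) | h) | h) | h) | h) | h)
    · left; exact h
    all_goals exact Or.inr ⟨_, by omega, _, by omega, h⟩
  · rintro (h | ⟨dx, hdx, dy, hdy, rfl⟩)
    · tauto
    · rcases hdx with rfl | rfl | rfl <;> rcases hdy with rfl | rfl | rfl <;> tauto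

-- membership in B's accumulated `near` set
theorem pvMem_near (num_pos : List (Int × Int)) (s0 : PySem.Set (Int × Int)) (q : Int × Int) :
    q ∈ (num_pos.foldl (fun s n =>
        ([-1, 0, 1] : List Int).foldl (fun s dx =>
          ([-1, 0, 1] : List Int).foldl (fun s dy =>
            PySem.Set.add s (n.1 + dx, n.2 + dy)) s) s) s0) ↔
      q ∈ s0 ∨ ∃ n ∈ num_pos, ∃ dx, (dx = -1 ∨ dx = 0 ∨ dx = 1) ∧
        ∃ dy, (dy = -1 ∨ dy = 0 ∨ dy = 1) ∧ q = (n.1 + dx, n.2 + dy) := by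
  induction num_pos generalizing s0 with
  | nil => simp
  | cons n rest ih =>
    rw [List.foldl_cons, ih, pvMem_inner]
    simp only [List.mem_cons]
    constructor
    · rintro ((h | ⟨dx, hdx, dy, hdy, rfl⟩) | ⟨m, hm, hd⟩)
      · exact Or.inl h
      · exact Or.inr ⟨n, Or.inl rfl, dx, hdx, dy, hdy, rfl⟩
      · exact Or.inr ⟨m, Or.inr hm, hd⟩
    · rintro (h | ⟨m, (rfl | hm), hd⟩)
      · exact Or.inl (Or.inl h)
      · exact Or.inl (Or.inr hd)
      · exact Or.inr ⟨m, hm, hd⟩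

-- A's per-part test equals B's membership test
theorem pvCond_iff (num_pos : List (Int × Int)) (p : Int × Int) :
    (num_pos.filter (fun x =>
        ((PySem.Set.ofList (pvCombos2 [1, 0, -1, 1, -1, 0])).map
          (fun d => (p.1 + d.1, p.2 + d.2))).contains x)).length > 0 ↔
      (PySem.Set.contains (num_pos.foldl (fun s n =>
        ([-1, 0, 1] : List Int).foldl (fun s dx =>
          ([-1, 0, 1] : List Int).foldl (fun s dy =>
            PySem.Set.add s (n.1 + dx, n.2 + dy)) s) s) PySem.Set.empty) p) = true := by
  rw [PySem.Set.contains_iff, pvMem_near]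
  simp only [PySem.Set.empty, List.not_mem_nil, false_or, gt_iff_lt]
  rw [List.length_pos_iff, Ne, List.filter_eq_nil_iff]
  push Not
  constructor
  · rintro ⟨n, hn, hc⟩
    simp only [List.contains_iff_mem, List.mem_map] at hc
    obtain ⟨⟨d1, d2⟩, hd, hn'⟩ := hc
    rw [pvMem_offsA] at hd
    have h1 : n.1 = p.1 + d1 := by rw [← hn']
    have h2 : n.2 = p.2 + d2 := by rw [← hn']
    exact ⟨n, hn, -d1, by omega, -d2, by omega, by ext <;> simp <;> omega⟩
  · rintro ⟨n, hn, dx, hdx, dy, hdy, rfl⟩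
    refine ⟨n, hn, ?_⟩
    simp only [List.contains_iff_mem, List.mem_map]
    exact ⟨(-dx, -dy), (pvMem_offsA _ _).2 ⟨by omega, by omega⟩, by ext <;> simp⟩

-- the two counting folds agree step by step
theorem pvCount_eq (num_pos part_pos : List (Int × Int)) (acc : Int) :
    part_pos.foldl (fun adj_part_count p =>
      let adj_pos := (PySem.Set.ofList (pvCombos2 [1, 0, -1, 1, -1, 0])).map
        (fun d => (p.1 + d.1, p.2 + d.2))
      let adj_num_pos := num_pos.filter (fun x => adj_pos.contains x)
      if adj_num_pos.length > 0 then adj_part_count + 1 else adj_part_count) acc =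
    part_pos.foldl (fun count p =>
      if PySem.Set.contains (num_pos.foldl (fun s n =>
          ([-1, 0, 1] : List Int).foldl (fun s dx =>
            ([-1, 0, 1] : List Int).foldl (fun s dy =>
              PySem.Set.add s (n.1 + dx, n.2 + dy)) s) s) PySem.Set.empty) p
      then count + 1 else count) acc := by
  induction part_pos generalizing acc with
  | nil => rfl
  | cons p rest ih =>
    rw [List.foldl_cons, List.foldl_cons, ih]
    congr 1
    exact if_congr (pvCond_iff num_pos p) rfl rfl

-- ===== VERDICT (by name: the statement is the Claim_ definition above) =====
theorem is_adjacent_to_part_py_spec : Claim_equal_is_adjacent_to_part_py := by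
  intro num_pos part_pos _
  exact pvCount_eq num_pos part_pos 0
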